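-- pv_equiv track=rewrite | github.com/monpie3/adventOfCode2024 | Day_21/task_21a.py | sanitize_path
-- ===== SOURCE A (Python) =====
-- def sanitize_path(move, start, KEYPAD):
--     x, y = start
--
--     excluded = KEYPAD["None"]
--     for m in move:
--         if m == "^":
--             x -= 1
--         elif m == "v":
--             x += 1
--         elif m == "<":
--             y -= 1
--         elif m == ">":
--             y += 1
--
--         if (x, y) == excluded:
--             return None
--     return move
-- ===== SOURCE B (Python) =====
-- DELTAS = {"^": (-1, 0), "v": (1, 0), "<": (0, -1), ">": (0, 1)}
--
--
-- def sanitize_path(move, start, KEYPAD):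
--     excluded = KEYPAD["None"]
--     # phase 1: generate every visited position (one per character, no-op for unknown chars)
--     positions = []
--     x, y = start
--     for m in move:
--         dx, dy = DELTAS.get(m, (0, 0))
--         x, y = x + dx, y + dy
--         positions.append((x, y))
--     # phase 2: membership test
--     return None if excluded in positions else move
-- ===== Notes on version B (the rewrite author's own statement) =====
-- stated objective: alternative
-- what changed: Replaced A's interleaved elif-chain stepping with early return by a two-phase pass: a delta-dictionary lookup builds the full list of visited positions, then a single membership test decides the result.
import Mathlib
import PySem

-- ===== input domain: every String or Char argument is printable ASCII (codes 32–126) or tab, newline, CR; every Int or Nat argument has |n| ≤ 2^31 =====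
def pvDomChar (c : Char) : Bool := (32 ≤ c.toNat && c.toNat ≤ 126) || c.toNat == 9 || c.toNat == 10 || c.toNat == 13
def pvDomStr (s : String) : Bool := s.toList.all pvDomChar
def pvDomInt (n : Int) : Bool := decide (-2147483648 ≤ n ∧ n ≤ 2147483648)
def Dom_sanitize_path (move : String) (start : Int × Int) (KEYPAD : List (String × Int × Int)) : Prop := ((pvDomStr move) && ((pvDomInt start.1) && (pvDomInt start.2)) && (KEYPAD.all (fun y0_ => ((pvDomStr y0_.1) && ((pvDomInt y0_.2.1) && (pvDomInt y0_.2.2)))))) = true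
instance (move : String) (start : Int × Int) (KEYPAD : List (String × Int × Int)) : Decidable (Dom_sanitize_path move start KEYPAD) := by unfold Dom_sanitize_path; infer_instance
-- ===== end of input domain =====

-- B is a two-phase rewrite (build all visited positions via a delta table, then one membership test); equal return value on all inputs where KEYPAD has a "None" key.

-- ===== PORT A =====
-- A's loop: step by the elif chain, check against excluded after every character, early return None.
def pvLoopA (cs : List Char) (x y : Int) (excluded : Int × Int) : Bool :=
  match cs with
  | [] => false
  | m :: rest =>
    let p : Int × Int :=
      if m == '^' then (x - 1, y)
      else if m == 'v' then (x + 1, y)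
      else if m == '<' then (x, y - 1)
      else if m == '>' then (x, y + 1)
      else (x, y)
    if p == excluded then true else pvLoopA rest p.1 p.2 excluded

def sanitize_path (move : String) (start : Int × Int) (KEYPAD : List (String × Int × Int)) : Option String :=
  match KEYPAD.find? (fun kv => kv.1 == "None") with
  | none => none   -- KeyError in Python; excluded by Pre_
  | some (_, ex) => if pvLoopA move.toList start.1 start.2 ex then none else some move

-- ===== PORT B =====
def pvDELTAS : PySem.Dict Char (Int × Int) :=
  PySem.Dict.ofList [('^', (-1, 0)), ('v', (1, 0)), ('<', (0, -1)), ('>', (0, 1))]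

-- B's phase 1: the list of all visited positions, one per character.
def pvPositions (cs : List Char) (p : Int × Int) : List (Int × Int) :=
  match cs with
  | [] => []
  | m :: rest =>
    let d := PySem.Dict.getD pvDELTAS m (0, 0)
    let q : Int × Int := (p.1 + d.1, p.2 + d.2)
    q :: pvPositions rest q

def sanitize_path_alt (move : String) (start : Int × Int) (KEYPAD : List (String × Int × Int)) : Option String :=
  match KEYPAD.find? (fun kv => kv.1 == "None") with
  | none => none   -- KeyError in Python; excluded by Pre_
  | some (_, ex) => if ex ∈ pvPositions move.toList start then none else some move

-- ===== PRECONDITION & SPEC =====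
-- Pre_: Python raises KeyError when KEYPAD has no "None" key; excluded (A returns nothing there).
def Pre_sanitize_path (move : String) (start : Int × Int) (KEYPAD : List (String × Int × Int)) : Prop :=
  "None" ∈ KEYPAD.map Prod.fst
instance (move : String) (start : Int × Int) (KEYPAD : List (String × Int × Int)) : Decidable (Pre_sanitize_path move start KEYPAD) := by unfold Pre_sanitize_path; infer_instance

def pvWitness_sanitize_path : String × (Int × Int) × (List (String × Int × Int)) :=
  ("^>v", (1, 0), [("None", (0, 1)), ("A", (2, 2))])

def Spec_sanitize_path (move : String) (start : Int × Int) (KEYPAD : List (String × Int × Int)) (out : Option String) : Prop := out = sanitize_path_alt move start KEYPAD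
instance (move : String) (start : Int × Int) (KEYPAD : List (String × Int × Int)) (out : Option String) : Decidable (Spec_sanitize_path move start KEYPAD out) := by unfold Spec_sanitize_path; infer_instance

-- ===== CLAIM (what is proved, stated in full; the proofs are below) =====
def Claim_equal_sanitize_path : Prop := ∀ (move : String) (start : Int × Int) (KEYPAD : List (String × Int × Int)), Dom_sanitize_path move start KEYPAD → Pre_sanitize_path move start KEYPAD → Spec_sanitize_path move start KEYPAD (sanitize_path move start KEYPAD)

-- ===== LEMMAS AND PROOFS =====

-- Values of B's delta table at the four move characters and elsewhere.
lemma pvDelta_up : PySem.Dict.getD pvDELTAS '^' (0, 0) = (-1, 0) := by decide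
lemma pvDelta_down : PySem.Dict.getD pvDELTAS 'v' (0, 0) = (1, 0) := by decide
lemma pvDelta_left : PySem.Dict.getD pvDELTAS '<' (0, 0) = (0, -1) := by decide
lemma pvDelta_right : PySem.Dict.getD pvDELTAS '>' (0, 0) = (0, 1) := by decide
lemma pvDelta_other (m : Char) (h1 : ¬ m = '^') (h2 : ¬ m = 'v') (h3 : ¬ m = '<') (h4 : ¬ m = '>') :
    PySem.Dict.getD pvDELTAS m (0, 0) = (0, 0) := by
  have e1 : ('^' == m) = false := beq_eq_false_iff_ne.mpr (Ne.symm h1)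
  have e2 : ('v' == m) = false := beq_eq_false_iff_ne.mpr (Ne.symm h2)
  have e3 : ('<' == m) = false := beq_eq_false_iff_ne.mpr (Ne.symm h3)
  have e4 : ('>' == m) = false := beq_eq_false_iff_ne.mpr (Ne.symm h4)
  simp [pvDELTAS, PySem.Dict.ofList, PySem.Dict.getD, PySem.Dict.get?, PySem.Dict.empty,
    PySem.Dict.update, PySem.Dict.insert, PySem.Dict.contains, List.find?, e1, e2, e3, e4]

-- A's elif-chain step equals B's delta-table step, character by character.
lemma pv_step_eq (m : Char) (x y : Int) :
    (if m == '^' then (x - 1, y)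
      else if m == 'v' then (x + 1, y)
      else if m == '<' then (x, y - 1)
      else if m == '>' then (x, y + 1)
      else (x, y))
    = (x + (PySem.Dict.getD pvDELTAS m (0, 0)).1, y + (PySem.Dict.getD pvDELTAS m (0, 0)).2) := by
  split_ifs with h1 h2 h3 h4 <;> simp only [beq_iff_eq] at *
  · subst h1; rw [pvDelta_up]; first
    | (simp [Prod.mk.injEq]; omega)
    | simp [Prod.mk.injEq]
  · subst h2; rw [pvDelta_down]; first
    | (simp [Prod.mk.injEq]; omega)
    | simp [Prod.mk.injEq]
  · subst h3; rw [pvDelta_left]; first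
    | (simp [Prod.mk.injEq]; omega)
    | simp [Prod.mk.injEq]
  · subst h4; rw [pvDelta_right]; first
    | (simp [Prod.mk.injEq]; omega)
    | simp [Prod.mk.injEq]
  · rw [pvDelta_other m h1 h2 h3 h4]; simp

lemma pv_loopA_eq_mem (cs : List Char) (x y : Int) (ex : Int × Int) :
    pvLoopA cs x y ex = decide (ex ∈ pvPositions cs (x, y)) := by
  induction cs generalizing x y with
  | nil => simp [pvLoopA, pvPositions]
  | cons m rest ih =>
    rw [pvLoopA, pvPositions]
    simp only [pv_step_eq]
    by_cases h : (x + (PySem.Dict.getD pvDELTAS m (0, 0)).1, y + (PySem.Dict.getD pvDELTAS m (0, 0)).2) = ex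
    · simp [h]
    · simp only [beq_iff_eq, h, if_false, ih]
      simp [eq_comm (a := ex)]
      intro he
      exact absurd he h

-- ===== VERDICT (by name: the statement is the Claim_ definition above) =====
theorem sanitize_path_spec : Claim_equal_sanitize_path := by
  intro move start KEYPAD _ _
  unfold Spec_sanitize_path sanitize_path sanitize_path_alt
  cases h : KEYPAD.find? (fun kv => kv.1 == "None") with
  | none => rfl
  | some kv =>
    obtain ⟨_, ex⟩ := kv
    simp [pv_loopA_eq_mem]
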